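-- pv_equiv track=rewrite | github.com/thealper2/codewars-solutions | 7-kyu/clean_up_after_your_dog.py | crap
-- ===== SOURCE A (Python) =====
-- def crap(garden, bags, cap):
--     total_cap = bags * cap
--     for gard in garden:
--         for g in gard:
--             if g == '@':
--                 total_cap -= 1
--
--             if g == 'D':
--                 return 'Dog!!'
--
--
--     return 'Clean' if total_cap >= 0 else 'Cr@p'
-- ===== SOURCE B (Python) =====
-- def crap(garden, bags, cap):
--     if any('D' in row for row in garden):
--         return 'Dog!!'
--     total = sum(row.count('@') for row in garden)
--     return 'Clean' if bags * cap - total >= 0 else 'Cr@p'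
-- ===== Notes on version B (the rewrite author's own statement) =====
-- stated objective: simpler
-- what changed: Replaces A's single interleaved early-returning nested loop with two separate whole-grid passes: an any-membership check for 'D', then a sum of per-row '@' counts compared against bags*cap.
import Mathlib
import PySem

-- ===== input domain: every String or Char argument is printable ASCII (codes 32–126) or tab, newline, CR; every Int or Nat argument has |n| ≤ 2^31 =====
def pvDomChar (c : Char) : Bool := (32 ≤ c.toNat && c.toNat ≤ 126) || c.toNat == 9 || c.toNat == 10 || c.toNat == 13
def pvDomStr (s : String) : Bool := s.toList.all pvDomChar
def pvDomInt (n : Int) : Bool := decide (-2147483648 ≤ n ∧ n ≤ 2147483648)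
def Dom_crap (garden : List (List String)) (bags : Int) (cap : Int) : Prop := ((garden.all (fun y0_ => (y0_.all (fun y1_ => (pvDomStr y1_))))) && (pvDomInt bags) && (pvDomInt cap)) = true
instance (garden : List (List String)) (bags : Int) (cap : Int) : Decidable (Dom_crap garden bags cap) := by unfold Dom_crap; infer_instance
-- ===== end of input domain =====

-- ===== PORT A =====
-- A's interleaved loop over cells with early return on 'D'; Sum carries either the running capacity or the early result.
def crapCells : List String → Int → (Int ⊕ String)
  | [], tc => Sum.inl tc
  | g :: gs, tc =>
    let tc' := if g == "@" then tc - 1 else tc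
    if g == "D" then Sum.inr "Dog!!" else crapCells gs tc'

def crapRows : List (List String) → Int → String
  | [], tc => if tc ≥ 0 then "Clean" else "Cr@p"
  | r :: rs, tc =>
    match crapCells r tc with
    | Sum.inr s => s
    | Sum.inl tc' => crapRows rs tc'

def crap (garden : List (List String)) (bags : Int) (cap : Int) : String :=
  crapRows garden (bags * cap)

-- ===== PORT B =====
def crap_alt (garden : List (List String)) (bags : Int) (cap : Int) : String :=
  if garden.any (fun row => row.contains "D") then "Dog!!"
  else
    let total : Int := (garden.map (fun row => (PySem.List.count row "@" : Int))).sum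
    if bags * cap - total ≥ 0 then "Clean" else "Cr@p"

-- ===== PRECONDITION & SPEC =====
def Spec_crap (garden : List (List String)) (bags : Int) (cap : Int) (out : String) : Prop := out = crap_alt garden bags cap
instance (garden : List (List String)) (bags : Int) (cap : Int) (out : String) : Decidable (Spec_crap garden bags cap out) := by unfold Spec_crap; infer_instance

-- ===== CLAIM (what is proved, stated in full; the proofs are below) =====
def Claim_equal_crap : Prop := ∀ (garden : List (List String)) (bags : Int) (cap : Int), Dom_crap garden bags cap → Spec_crap garden bags cap (crap garden bags cap)

-- ===== LEMMAS AND PROOFS =====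
theorem crapCells_dog (r : List String) (tc : Int) (h : "D" ∈ r) :
    crapCells r tc = Sum.inr "Dog!!" := by
  induction r generalizing tc with
  | nil => cases h
  | cons g gs ih =>
    simp only [crapCells]
    by_cases hg : g == "D"
    · simp [hg]
    · have : "D" ∈ gs := by
        rcases List.mem_cons.mp h with h1 | h1
        · exact absurd (by simp [h1.symm]) hg
        · exact h1
      simp [hg, ih _ this]

theorem crapCells_clean (r : List String) (tc : Int) (h : "D" ∉ r) :
    crapCells r tc = Sum.inl (tc - (PySem.List.count r "@" : Int)) := by
  induction r generalizing tc with
  | nil => simp [crapCells, PySem.List.count]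
  | cons g gs ih =>
    have hgD : ¬ (g == "D") := fun hb => h (by simp [eq_of_beq hb])
    have hgs : "D" ∉ gs := fun hm => h (List.mem_cons_of_mem _ hm)
    simp only [crapCells, hgD]
    rw [ih _ hgs]
    by_cases hg : g == "@"
    · have : g = "@" := eq_of_beq hg
      simp [this, PySem.List.count]
      ring_nf
    · have : g ≠ "@" := fun e => hg (by simp [e])
      simp [hg, PySem.List.count, this]

theorem crapRows_eq (rs : List (List String)) (tc : Int) :
    crapRows rs tc =
      (if rs.any (fun row => row.contains "D") then "Dog!!"
       else if tc - ((rs.map (fun row => (PySem.List.count row "@" : Int))).sum) ≥ 0 then "Clean" else "Cr@p") := by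
  induction rs generalizing tc with
  | nil => simp [crapRows]
  | cons r rest ih =>
    by_cases hD : "D" ∈ r
    · have hany : ((r :: rest).any fun row => row.contains "D") = true := by
        have : r.contains "D" = true := by simpa using hD
        simp only [List.any_cons, this, Bool.true_or]
      simp only [crapRows, crapCells_dog r tc hD]
      rw [hany]
      rfl
    · have hc : r.contains "D" = false := by simpa using hD
      simp only [crapRows, crapCells_clean r tc hD, ih, List.any_cons, hc, Bool.false_or,
        List.map_cons, List.sum_cons]
      congr 1
      split_ifs with h1 h2 h2 <;> first | rfl | (exfalso; omega)

-- ===== VERDICT (by name: the statement is the Claim_ definition above) =====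
theorem crap_spec : Claim_equal_crap := by
  intro garden bags cap _
  unfold Spec_crap crap crap_alt
  rw [crapRows_eq]
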